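-- pv_equiv track=rewrite | github.com/AngelicosPhosphoros/Test-Fast-Math-Using-Hack-Rust | compile.py | add_fast_intrinsics
-- ===== SOURCE A (Python) =====
-- def add_fast_intrinsics(lines):
--     is_fast_f_met = False
--     is_slow_f_met = False
--     output = []
--     for line in lines:
--         if '@dot_product_fast' in line:
--             is_fast_f_met = True
--         if '@dot_product_slow' in line:
--             is_slow_f_met = True
--         if is_fast_f_met and not is_slow_f_met:
--             if 'fmul' in line:
--                 line = line.replace('fmul', 'fmul nsz arcp contract reassoc ')
--             if 'fadd' in line:
--                 line = line.replace('fadd', 'fadd nsz arcp contract reassoc ')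
--         output.append(line)
--     return output
-- ===== SOURCE B (Python) =====
-- def add_fast_intrinsics(lines):
--     FLAGS = 'nsz arcp contract reassoc '
--     start = next((i for i, line in enumerate(lines) if '@dot_product_fast' in line), None)
--     stop = next((i for i, line in enumerate(lines) if '@dot_product_slow' in line), len(lines))
--     output = []
--     for i, line in enumerate(lines):
--         if start is not None and start <= i < stop:
--             line = line.replace('fmul', 'fmul ' + FLAGS).replace('fadd', 'fadd ' + FLAGS)
--         output.append(line)
--     return output
-- ===== Notes on version B (the rewrite author's own statement) =====
-- stated objective: alternative
-- what changed: A's two per-line running booleans are replaced by precomputing the region boundaries (first index containing '@dot_product_fast', first index containing '@dot_product_slow', defaulting to len(lines)) and then one enumerate pass that applies the unguarded fmul/fadd replacement chain exactly on the index interval [start, stop).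
import Mathlib
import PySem

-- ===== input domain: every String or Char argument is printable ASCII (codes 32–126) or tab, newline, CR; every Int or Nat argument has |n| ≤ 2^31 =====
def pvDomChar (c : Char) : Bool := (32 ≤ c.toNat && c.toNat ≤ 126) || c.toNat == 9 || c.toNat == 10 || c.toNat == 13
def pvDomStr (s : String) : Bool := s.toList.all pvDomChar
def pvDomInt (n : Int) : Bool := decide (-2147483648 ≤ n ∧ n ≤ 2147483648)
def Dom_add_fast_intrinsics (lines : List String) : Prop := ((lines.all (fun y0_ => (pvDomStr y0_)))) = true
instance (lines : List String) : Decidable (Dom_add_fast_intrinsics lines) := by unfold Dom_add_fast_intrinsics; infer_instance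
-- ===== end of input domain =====

-- B replaces A's two per-line running booleans by precomputed region boundaries (first index
-- containing '@dot_product_fast', first index containing '@dot_product_slow') and one
-- index-gated pass; same return value, a different decomposition (no speed claim).


-- ===== PORT A =====
-- one iteration of A's loop body, on state (is_fast_f_met, is_slow_f_met, output)
def stepA (st : Bool × Bool × List String) (line : String) : Bool × Bool × List String :=
  let fast := if PySem.Str.isIn "@dot_product_fast" line then true else st.1
  let slow := if PySem.Str.isIn "@dot_product_slow" line then true else st.2.1
  let line1 :=
    if fast && !slow then
      let l2 := if PySem.Str.isIn "fmul" line then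
          PySem.Str.replace line "fmul" "fmul nsz arcp contract reassoc " else line
      if PySem.Str.isIn "fadd" l2 then
          PySem.Str.replace l2 "fadd" "fadd nsz arcp contract reassoc " else l2
    else line
  (fast, slow, st.2.2 ++ [line1])

def add_fast_intrinsics (lines : List String) : List String :=
  (lines.foldl stepA (false, false, [])).2.2

-- ===== PORT B =====
def add_fast_intrinsics_alt (lines : List String) : List String :=
  let start? : Option Int :=
    (lines.findIdx? (fun l => PySem.Str.isIn "@dot_product_fast" l)).map (fun n => (n : Int))
  let stop : Int :=
    ((lines.findIdx? (fun l => PySem.Str.isIn "@dot_product_slow" l)).map (fun n => (n : Int))).getD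
      (lines.length : Int)
  (PySem.List.enumerate lines 0).foldl
    (fun out p => out ++
      [match start? with
       | some s =>
         if s ≤ p.1 ∧ p.1 < stop then
           PySem.Str.replace
             (PySem.Str.replace p.2 "fmul" ("fmul " ++ "nsz arcp contract reassoc "))
             "fadd" ("fadd " ++ "nsz arcp contract reassoc ")
         else p.2
       | none => p.2]) []

-- ===== PRECONDITION & SPEC =====
def Spec_add_fast_intrinsics (lines : List String) (out : List String) : Prop := out = add_fast_intrinsics_alt lines
instance (lines : List String) (out : List String) : Decidable (Spec_add_fast_intrinsics lines out) := by unfold Spec_add_fast_intrinsics; infer_instance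

-- ===== CLAIM (what is proved, stated in full; the proofs are below) =====
def Claim_equal_add_fast_intrinsics : Prop := ∀ (lines : List String), Dom_add_fast_intrinsics lines → Spec_add_fast_intrinsics lines (add_fast_intrinsics lines)

-- ===== LEMMAS AND PROOFS =====

-- B's per-line transform (both replaces, unguarded)
def trB (l : String) : String :=
  PySem.Str.replace
    (PySem.Str.replace l "fmul" ("fmul " ++ "nsz arcp contract reassoc "))
    "fadd" ("fadd " ++ "nsz arcp contract reassoc ")

-- the gate of B's pass (the match inside B's loop, abstracted over the boundaries)
def gateB (start? : Option Int) (stop : Int) (i : Int) (l : String) : String :=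
  match start? with
  | some s => if s ≤ i ∧ i < stop then trB l else l
  | none => l

-- the first-match index, cast to Int and shifted by the offset k
def idxShift (x : Option Nat) (k : Int) : Option Int := x.map (fun n : Nat => (n : Int) + k)

lemma idxShift_none (k : Int) : idxShift none k = none := rfl
lemma idxShift_some (n : Nat) (k : Int) : idxShift (some n) k = some ((n : Int) + k) := rfl

lemma idxShift_succ (x : Option Nat) (k : Int) :
    idxShift (Option.map (fun i => i + 1) x) k = idxShift x (k + 1) := by
  cases x with
  | none => rfl
  | some n => simp only [Option.map_some, idxShift_some, Option.some.injEq]; push_cast; ring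

-- A's loop as structural recursion over the lines, carrying the two booleans
def goA (fast slow : Bool) : List String → List String
  | [] => []
  | line :: rest =>
    let f := if PySem.Str.isIn "@dot_product_fast" line then true else fast
    let s := if PySem.Str.isIn "@dot_product_slow" line then true else slow
    (if f && !s then
      (let l2 := if PySem.Str.isIn "fmul" line then
          PySem.Str.replace line "fmul" "fmul nsz arcp contract reassoc " else line
       if PySem.Str.isIn "fadd" l2 then
          PySem.Str.replace l2 "fadd" "fadd nsz arcp contract reassoc " else l2)
     else line) :: goA f s rest

lemma foldA_eq_goA (lines : List String) : ∀ (fast slow : Bool) (acc : List String),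
    (lines.foldl stepA (fast, slow, acc)).2.2 = acc ++ goA fast slow lines := by
  induction lines with
  | nil => intro fast slow acc; simp [goA]
  | cons l t ih =>
    intro fast slow acc
    simp only [List.foldl_cons, stepA, goA]
    rw [ih]
    simp

-- replace is the identity when the pattern does not occur
lemma replace_go_no_match (old new : List Char) :
    ∀ (l : List Char) (fuel : Nat) (acc : List Char), ¬ old <:+: l →
      PySem.Chars.replace.go old new fuel l acc = acc.reverse ++ l := by
  intro l
  induction l with
  | nil =>
    intro fuel acc _
    cases fuel <;> simp [PySem.Chars.replace.go]
  | cons c t ih =>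
    intro fuel acc h
    cases fuel with
    | zero => simp [PySem.Chars.replace.go]
    | succ fuel =>
      rw [PySem.Chars.replace.go]
      have hpre : old.isPrefixOf (c :: t) = false := by
        by_contra hc
        rw [Bool.not_eq_false, List.isPrefixOf_iff_prefix] at hc
        exact h hc.isInfix
      rw [hpre]
      simp only [Bool.false_eq_true, if_false]
      rw [ih fuel (c :: acc) (fun hc => h (List.infix_cons hc))]
      simp

lemma replace_noop (s old new : String) (h : PySem.Str.isIn old s = false) :
    PySem.Str.replace s old new = s := by
  rw [PySem.Str.isIn_eq] at h
  have hne : old.toList.isEmpty = false := by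
    cases hol : old.toList with
    | nil => rw [hol, PySem.Chars.isIn_nil] at h; exact absurd h (by simp)
    | cons a b => simp
  have hinf := (PySem.Chars.isIn_eq_false_iff _ _).mp h
  unfold PySem.Str.replace PySem.Chars.replace
  rw [hne]
  simp only [Bool.false_eq_true, if_false]
  rw [replace_go_no_match _ _ _ _ _ hinf]
  simp [String.ofList_toList]

-- A's guarded double replace equals B's unguarded chain
lemma guarded_eq_trB (line : String) :
    (let l2 := if PySem.Str.isIn "fmul" line then
        PySem.Str.replace line "fmul" "fmul nsz arcp contract reassoc " else line
     if PySem.Str.isIn "fadd" l2 then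
        PySem.Str.replace l2 "fadd" "fadd nsz arcp contract reassoc " else l2) = trB line := by
  have hflag : ("fmul " ++ "nsz arcp contract reassoc " : String) = "fmul nsz arcp contract reassoc " := by decide
  have hflag2 : ("fadd " ++ "nsz arcp contract reassoc " : String) = "fadd nsz arcp contract reassoc " := by decide
  unfold trB
  rw [hflag, hflag2]
  cases h1 : PySem.Str.isIn "fmul" line with
  | true =>
    simp only [if_true]
    cases h2 : PySem.Str.isIn "fadd" (PySem.Str.replace line "fmul" "fmul nsz arcp contract reassoc ") with
    | true => rw [if_pos rfl]
    | false =>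
      rw [if_neg Bool.false_ne_true]
      exact (replace_noop _ _ _ h2).symm
  | false =>
    have e1 : PySem.Str.replace line "fmul" "fmul nsz arcp contract reassoc " = line :=
      replace_noop _ _ _ h1
    rw [e1]
    simp only [Bool.false_eq_true, if_false]
    cases h2 : PySem.Str.isIn "fadd" line with
    | true => rw [if_pos rfl]
    | false =>
      rw [if_neg Bool.false_ne_true]
      exact (replace_noop _ _ _ h2).symm

lemma goA_cons (fast slow : Bool) (line : String) (rest : List String) :
    goA fast slow (line :: rest) =
      ((if ((if PySem.Str.isIn "@dot_product_fast" line then true else fast) &&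
            !(if PySem.Str.isIn "@dot_product_slow" line then true else slow)) then trB line else line) ::
        goA (if PySem.Str.isIn "@dot_product_fast" line then true else fast)
            (if PySem.Str.isIn "@dot_product_slow" line then true else slow) rest) := by
  simp only [goA, guarded_eq_trB]

lemma main_lemma (t : List String) : ∀ (k : Int) (fast slow : Bool)
    (start? : Option Int) (stop : Int),
    (fast = true → ∃ s, start? = some s ∧ s < k) →
    (fast = false → start? = idxShift (t.findIdx? (fun l => PySem.Str.isIn "@dot_product_fast" l)) k) →
    (slow = true → stop < k) →
    (slow = false → stop = ((idxShift (t.findIdx? (fun l => PySem.Str.isIn "@dot_product_slow" l)) k).getD ((t.length : Int) + k))) →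
    goA fast slow t = (PySem.List.enumerate t k).map (fun p => gateB start? stop p.1 p.2) := by
  induction t with
  | nil =>
    intro k fast slow start? stop _ _ _ _
    simp [goA, PySem.List.enumerate]
  | cons l t ih =>
    intro k fast slow start? stop hF1 hF0 hS1 hS0
    rw [PySem.List.enumerate_cons, List.map_cons, goA_cons]
    have hfcons : List.findIdx? (fun l => PySem.Str.isIn "@dot_product_fast" l) (l :: t) =
        (if PySem.Str.isIn "@dot_product_fast" l = true then some 0 else
          Option.map (fun i => i + 1) (List.findIdx? (fun l => PySem.Str.isIn "@dot_product_fast" l) t)) :=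
      List.findIdx?_cons
    have hscons : List.findIdx? (fun l => PySem.Str.isIn "@dot_product_slow" l) (l :: t) =
        (if PySem.Str.isIn "@dot_product_slow" l = true then some 0 else
          Option.map (fun i => i + 1) (List.findIdx? (fun l => PySem.Str.isIn "@dot_product_slow" l) t)) :=
      List.findIdx?_cons
    -- the new boolean state after the head line
    cases hfl : PySem.Str.isIn "@dot_product_fast" l with
    | true =>
      -- fast is met from this line on
      have hstart : ∃ s, start? = some s ∧ s ≤ k := by
        cases fast with
        | true => obtain ⟨s, hs, hlt⟩ := hF1 rfl; exact ⟨s, hs, by omega⟩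
        | false =>
          refine ⟨k, ?_, le_refl k⟩
          rw [hF0 rfl, hfcons]
          simp only [hfl, if_true, idxShift_some, Int.natCast_zero, zero_add]
      obtain ⟨s0, hs0, hs0le⟩ := hstart
      cases hsl : PySem.Str.isIn "@dot_product_slow" l with
      | true =>
        -- slow also met at (or before) this line: inactive here and after
        have hstop : stop ≤ k := by
          cases slow with
          | true => have := hS1 rfl; omega
          | false =>
            rw [hS0 rfl, hscons]
            simp only [hsl, if_true, idxShift_some, Int.natCast_zero, zero_add, Option.getD_some]; omega
        have hhead : gateB start? stop k l = l := by
          rw [hs0, gateB]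
          exact if_neg (by omega)
        rw [hhead]
        simp only [if_true, Bool.not_true, Bool.and_false, Bool.false_eq_true, if_false]
        refine congrArg _ ?_
        exact ih (k + 1) true true start? stop
          (fun _ => ⟨s0, hs0, by omega⟩) (by intro hc; exact absurd hc (by simp))
          (fun _ => by omega) (by intro hc; exact absurd hc (by simp))
      | false =>
        cases slow with
        | true =>
          -- slow met earlier: inactive
          have hstop : stop < k := hS1 rfl
          have hhead : gateB start? stop k l = l := by
            rw [hs0, gateB]
            exact if_neg (by omega)
          rw [hhead]
          simp only [if_true, Bool.false_eq_true, if_false, Bool.not_true, Bool.and_false]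
          refine congrArg _ ?_
          exact ih (k + 1) true true start? stop
            (fun _ => ⟨s0, hs0, by omega⟩) (by intro hc; exact absurd hc (by simp))
            (fun _ => by omega) (by intro hc; exact absurd hc (by simp))
        | false =>
          -- active region
          have hstop : stop = ((idxShift (t.findIdx? (fun l => PySem.Str.isIn "@dot_product_slow" l)) (k + 1)).getD ((t.length : Int) + (k + 1))) := by
            rw [hS0 rfl, hscons]
            simp only [hsl, Bool.false_eq_true, if_false, idxShift_succ]
            cases t.findIdx? (fun l => PySem.Str.isIn "@dot_product_slow" l) with
            | none =>
              simp only [idxShift_none, Option.getD_none, List.length_cons]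
              push_cast; ring
            | some n => simp only [idxShift_some, Option.getD_some]
          have hkstop : k < stop := by
            rw [hstop]
            cases t.findIdx? (fun l => PySem.Str.isIn "@dot_product_slow" l) with
            | none => simp only [idxShift_none, Option.getD_none]; have := t.length.cast_nonneg (α := Int); omega
            | some n => simp only [idxShift_some, Option.getD_some]; have := n.cast_nonneg (α := Int); omega
          have hhead : gateB start? stop k l = trB l := by
            rw [hs0, gateB]
            exact if_pos ⟨hs0le, hkstop⟩
          rw [hhead]
          simp only [if_true, Bool.false_eq_true, if_false, Bool.not_false, Bool.and_true]
          refine congrArg _ ?_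
          exact ih (k + 1) true false start? stop
            (fun _ => ⟨s0, hs0, by omega⟩) (by intro hc; exact absurd hc (by simp))
            (by intro hc; exact absurd hc (by simp)) (fun _ => hstop)
    | false =>
      -- fast not met up to and including this line ⟺ fast = current flag
      cases fast with
      | true =>
        obtain ⟨s0, hs0, hs0lt⟩ := hF1 rfl
        cases hsl : PySem.Str.isIn "@dot_product_slow" l with
        | true =>
          have hstop : stop ≤ k := by
            cases slow with
            | true => have := hS1 rfl; omega
            | false =>
              rw [hS0 rfl, hscons]
              simp only [hsl, if_true, idxShift_some, Int.natCast_zero, zero_add, Option.getD_some]; omega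
          have hhead : gateB start? stop k l = l := by
            rw [hs0, gateB]
            exact if_neg (by omega)
          rw [hhead]
          simp only [if_true, Bool.false_eq_true, if_false, Bool.not_true, Bool.and_false]
          refine congrArg _ ?_
          exact ih (k + 1) true true start? stop
            (fun _ => ⟨s0, hs0, by omega⟩) (by intro hc; exact absurd hc (by simp))
            (fun _ => by omega) (by intro hc; exact absurd hc (by simp))
        | false =>
          cases slow with
          | true =>
            have hstop : stop < k := hS1 rfl
            have hhead : gateB start? stop k l = l := by
              rw [hs0, gateB]
              exact if_neg (by omega)
            rw [hhead]
            simp only [Bool.false_eq_true, if_false, Bool.not_true, Bool.and_false]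
            refine congrArg _ ?_
            exact ih (k + 1) true true start? stop
              (fun _ => ⟨s0, hs0, by omega⟩) (by intro hc; exact absurd hc (by simp))
              (fun _ => by omega) (by intro hc; exact absurd hc (by simp))
          | false =>
            have hstop : stop = ((idxShift (t.findIdx? (fun l => PySem.Str.isIn "@dot_product_slow" l)) (k + 1)).getD ((t.length : Int) + (k + 1))) := by
              rw [hS0 rfl, hscons]
              simp only [hsl, Bool.false_eq_true, if_false, idxShift_succ]
              cases t.findIdx? (fun l => PySem.Str.isIn "@dot_product_slow" l) with
              | none =>
                simp only [idxShift_none, Option.getD_none, List.length_cons]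
                push_cast; ring
              | some n => simp only [idxShift_some, Option.getD_some]
            have hkstop : k < stop := by
              rw [hstop]
              cases t.findIdx? (fun l => PySem.Str.isIn "@dot_product_slow" l) with
              | none => simp only [idxShift_none, Option.getD_none]; have := t.length.cast_nonneg (α := Int); omega
              | some n => simp only [idxShift_some, Option.getD_some]; have := n.cast_nonneg (α := Int); omega
            have hhead : gateB start? stop k l = trB l := by
              rw [hs0, gateB]
              exact if_pos ⟨by omega, hkstop⟩
            rw [hhead]
            simp only [Bool.false_eq_true, if_false, Bool.not_false, Bool.and_true]
            refine congrArg _ ?_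
            exact ih (k + 1) true false start? stop
              (fun _ => ⟨s0, hs0, by omega⟩) (by intro hc; exact absurd hc (by simp))
              (by intro hc; exact absurd hc (by simp)) (fun _ => hstop)
      | false =>
        -- fast still unmet: the head is left alone regardless of slow
        have hstart : start? = idxShift (t.findIdx? (fun l => PySem.Str.isIn "@dot_product_fast" l)) (k + 1) := by
          rw [hF0 rfl, hfcons]
          simp only [hfl, Bool.false_eq_true, if_false, idxShift_succ]
        have hhead : gateB start? stop k l = l := by
          rw [hstart]
          cases t.findIdx? (fun l => PySem.Str.isIn "@dot_product_fast" l) with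
          | none => rw [idxShift_none]; rfl
          | some n =>
            rw [idxShift_some, gateB]
            exact if_neg (by intro hc; have := n.cast_nonneg (α := Int); omega)
        rw [hhead]
        cases hsl : PySem.Str.isIn "@dot_product_slow" l with
        | true =>
          have hstop : stop ≤ k := by
            cases slow with
            | true => have := hS1 rfl; omega
            | false =>
              rw [hS0 rfl, hscons]
              simp only [hsl, if_true, idxShift_some, Int.natCast_zero, zero_add, Option.getD_some]; omega
          simp only [if_true, Bool.false_eq_true, if_false, Bool.not_true, Bool.and_false]
          refine congrArg _ ?_
          exact ih (k + 1) false true start? stop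
            (by intro hc; exact absurd hc (by simp)) (fun _ => hstart)
            (fun _ => by omega) (by intro hc; exact absurd hc (by simp))
        | false =>
          cases slow with
          | true =>
            have hstop : stop < k := hS1 rfl
            simp only [Bool.false_eq_true, if_false, Bool.not_true, Bool.and_false]
            refine congrArg _ ?_
            exact ih (k + 1) false true start? stop
              (by intro hc; exact absurd hc (by simp)) (fun _ => hstart)
              (fun _ => by omega) (by intro hc; exact absurd hc (by simp))
          | false =>
            have hstop : stop = ((idxShift (t.findIdx? (fun l => PySem.Str.isIn "@dot_product_slow" l)) (k + 1)).getD ((t.length : Int) + (k + 1))) := by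
              rw [hS0 rfl, hscons]
              simp only [hsl, Bool.false_eq_true, if_false, idxShift_succ]
              cases t.findIdx? (fun l => PySem.Str.isIn "@dot_product_slow" l) with
              | none =>
                simp only [idxShift_none, Option.getD_none, List.length_cons]
                push_cast; ring
              | some n => simp only [idxShift_some, Option.getD_some]
            simp only [Bool.false_eq_true, if_false]
            refine congrArg _ ?_
            exact ih (k + 1) false false start? stop
              (by intro hc; exact absurd hc (by simp)) (fun _ => hstart)
              (by intro hc; exact absurd hc (by simp)) (fun _ => hstop)

-- ===== VERDICT (by name: the statement is the Claim_ definition above) =====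
theorem add_fast_intrinsics_spec : Claim_equal_add_fast_intrinsics := by
  intro lines _
  unfold Spec_add_fast_intrinsics add_fast_intrinsics
  rw [foldA_eq_goA, List.nil_append]
  simp only [add_fast_intrinsics_alt]
  rw [PySem.List.foldl_append_singleton_eq_map, List.nil_append]
  have h := main_lemma lines 0 false false
    ((lines.findIdx? (fun l => PySem.Str.isIn "@dot_product_fast" l)).map (fun n => (n : Int)))
    (((lines.findIdx? (fun l => PySem.Str.isIn "@dot_product_slow" l)).map (fun n => (n : Int))).getD (lines.length : Int))
    (by intro hc; exact absurd hc (by simp))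
    (by
      intro _
      cases lines.findIdx? (fun l => PySem.Str.isIn "@dot_product_fast" l) with
      | none => rfl
      | some n => simp [idxShift])
    (by intro hc; exact absurd hc (by simp))
    (by
      intro _
      cases lines.findIdx? (fun l => PySem.Str.isIn "@dot_product_slow" l) with
      | none => simp [idxShift]
      | some n => simp [idxShift])
  rw [h]
  refine List.map_congr_left ?_
  intro p _
  simp only [gateB.eq_def, trB]
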